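-- pv_equiv track=rewrite | github.com/pypi-data/pypi-mirror-279 | packages/commonhelper/commonhelper-0.0.5-py3-none-any.whl/commonhelper/__init__.py | cluster_by_linkages
-- ===== SOURCE A (Python) =====
-- def cluster_by_linkages(linkages):
-- 	'''
-- 	Given an iterable of linkage, cluster the elements (which must be hashable)
--
-- 	Example usage:
--
-- 	.. code-block:: python
--
-- 		linkages = [(1, 3), (1, 5), (2, 6), (3, 6, 9)]
-- 		cluster_by_linkages(linkages)
-- 		# Output: {1: {1, 2, 3, 5, 6, 9}, 3: {1, 2, 3, 5, 6, 9}, 5: {1, 2, 3, 5, 6, 9}, 2: {1, 2, 3, 5, 6, 9}, 6: {1, 2, 3, 5, 6, 9}, 9: {1, 2, 3, 5, 6, 9}}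
--
-- 		linkages = [(1, 3), (1, 5), (2, 6), (6, 9)]
-- 		cluster_by_linkages(linkages)
-- 		# Output: {1: {1, 3, 5}, 3: {1, 3, 5}, 5: {1, 3, 5}, 2: {9, 2, 6}, 6: {9, 2, 6}, 9: {9, 2, 6}}
--
-- 		linkages = [(1, 3), (1, 5), (2, 6), (6, 9)]
-- 		list({id(cluster):cluster for cluster in cluster_by_linkages(linkages).values()}.values())
-- 		# Output: [{1, 3, 5}, {9, 2, 6}]
-- 	'''
-- 	cluster_map = dict()
-- 	for linkage in linkages:
-- 		element_with_largest_cluster = max(linkage, key=lambda element: len(cluster_map[element]) if element in cluster_map else 0)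
-- 		if element_with_largest_cluster in cluster_map:
-- 			largest_cluster = cluster_map[element_with_largest_cluster]
-- 		else:
-- 			largest_cluster = set()
--
-- 		for element in linkage:
-- 			if element in cluster_map:
-- 				if cluster_map[element] is not largest_cluster:
-- 					for e in list(cluster_map[element]):
-- 						largest_cluster.add(e)
-- 						cluster_map[e] = largest_cluster
-- 			else:
-- 				largest_cluster.add(element)
-- 				cluster_map[element] = largest_cluster
--
-- 	return cluster_map
-- ===== SOURCE B (Python) =====
-- def cluster_by_linkages(linkages):
--     # Union-find with per-root member lists: parent pointers are only updated at
--     # roots (O(1) union), find walks the parent chain; one final pass builds one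
--     # shared set per component.
--     parent = {}
--     members = {}
--
--     def find(x):
--         while parent[x] != x:
--             x = parent[x]
--         return x
--
--     for linkage in linkages:
--         anchor = max(linkage, key=lambda e: len(members[find(e)]) if e in parent else 0)
--         if anchor in parent:
--             root = find(anchor)
--         else:
--             parent[anchor] = anchor
--             members[anchor] = [anchor]
--             root = anchor
--         for e in linkage:
--             if e not in parent:
--                 parent[e] = root
--                 members[root].append(e)
--             else:
--                 r = find(e)
--                 if r != root:
--                     parent[r] = root
--                     members[root].extend(members.pop(r))
--
--     comps = {}
--     result = {}
--     for e in parent: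
--         r = find(e)
--         if r not in comps:
--             comps[r] = set(members[r])
--         result[e] = comps[r]
--     return result
-- ===== Notes on version B (the rewrite author's own statement) =====
-- stated objective: alternative
-- what changed: Replaces A's shared-mutable-set scheme (every element keyed directly to its cluster set, each merge rewriting the map entry of every absorbed element) by a union-find: parent pointers updated only at roots (O(1) union), a member list kept per root, find walking the parent chain, and a final pass building one shared set per component.
-- outside the precondition, e.g. on cluster_by_linkages([[1, 2], []]): A raises ValueError, B raises ValueError
import Mathlib
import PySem

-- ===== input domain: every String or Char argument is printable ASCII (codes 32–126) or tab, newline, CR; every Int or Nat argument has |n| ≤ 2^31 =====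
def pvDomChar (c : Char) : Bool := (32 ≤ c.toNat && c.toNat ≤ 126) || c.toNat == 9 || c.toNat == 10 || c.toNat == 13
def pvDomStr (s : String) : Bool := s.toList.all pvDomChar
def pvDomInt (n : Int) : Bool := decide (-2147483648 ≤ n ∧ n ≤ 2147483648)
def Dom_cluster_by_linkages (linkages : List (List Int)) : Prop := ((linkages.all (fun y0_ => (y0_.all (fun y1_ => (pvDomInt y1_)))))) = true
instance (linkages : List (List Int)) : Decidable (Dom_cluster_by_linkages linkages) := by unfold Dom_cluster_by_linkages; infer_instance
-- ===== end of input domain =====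

-- B replaces A's shared-mutable-set clustering (each merge rewrites every absorbed
-- element's map entry) by a union-find with per-root member lists (alternative;
-- same return value, proved below).
-- ===== PORT A =====
-- A keys every element to a shared mutable set; object identity/aliasing is modelled
-- by an id-indirection: cmap maps an element to a set id, store holds the sets.
def keyA (cmap : PySem.Dict Int Nat) (store : List (List Int)) (e : Int) : Int :=
  match cmap.get? e with
  | some i => ((store.getD i []).length : Int)
  | none => 0

-- body of "for e in list(cluster_map[element]): largest_cluster.add(e); cluster_map[e] = largest_cluster"
def mergeElemA (lid : Nat) (st : PySem.Dict Int Nat × List (List Int)) (e : Int) :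
    PySem.Dict Int Nat × List (List Int) :=
  (st.1.insert e lid, st.2.set lid (PySem.Set.add (st.2.getD lid []) e))

def stepElemA (lid : Nat) (st : PySem.Dict Int Nat × List (List Int)) (element : Int) :
    PySem.Dict Int Nat × List (List Int) :=
  match st.1.get? element with
  | some j => if j ≠ lid then (st.2.getD j []).foldl (mergeElemA lid) st else st
  | none => (st.1.insert element lid, st.2.set lid (PySem.Set.add (st.2.getD lid []) element))

def stepLinkA (st : PySem.Dict Int Nat × List (List Int)) (linkage : List Int) :
    PySem.Dict Int Nat × List (List Int) :=
  match PySem.List.max? linkage (keyA st.1 st.2) with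
  | none => st   -- empty linkage: Python raises ValueError (excluded by Pre_)
  | some m =>
    match st.1.get? m with
    | some i => linkage.foldl (stepElemA i) st
    | none => linkage.foldl (stepElemA st.2.length) (st.1, st.2 ++ [[]])   -- largest_cluster = set(): fresh id

def cluster_by_linkages (linkages : List (List Int)) : List (Int × List Int) :=
  let st := linkages.foldl stepLinkA (PySem.Dict.empty, [])
  st.1.items.map (fun p => (p.1, st.2.getD p.2 []))

-- ===== PORT B =====
-- B: union-find — parent pointers (updated only at roots), member list per root,
-- 'find' walks the parent chain (fuel = number of keys bounds any chain, proved below).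
def findB (parent : PySem.Dict Int Int) : Nat → Int → Int
  | 0, x => x
  | fuel+1, x =>
    let p := parent.getD x x
    if p = x then x else findB parent fuel p

def keyB (parent : PySem.Dict Int Int) (members : PySem.Dict Int (List Int)) (e : Int) : Int :=
  if parent.contains e then ((members.getD (findB parent parent.size e) []).length : Int) else 0

def stepElemB (root : Int) (st : PySem.Dict Int Int × PySem.Dict Int (List Int)) (e : Int) :
    PySem.Dict Int Int × PySem.Dict Int (List Int) :=
  if st.1.contains e = false then
    (st.1.insert e root, st.2.insert root (st.2.getD root [] ++ [e]))
  else
    let r := findB st.1 st.1.size e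
    if r ≠ root then
      (st.1.insert r root, (st.2.erase r).insert root (st.2.getD root [] ++ st.2.getD r []))
    else st

def stepLinkB (st : PySem.Dict Int Int × PySem.Dict Int (List Int)) (linkage : List Int) :
    PySem.Dict Int Int × PySem.Dict Int (List Int) :=
  match PySem.List.max? linkage (keyB st.1 st.2) with
  | none => st   -- empty linkage: Python raises ValueError (excluded by Pre_)
  | some anchor =>
    if st.1.contains anchor then
      linkage.foldl (stepElemB (findB st.1 st.1.size anchor)) st
    else
      linkage.foldl (stepElemB anchor) (st.1.insert anchor anchor, st.2.insert anchor [anchor])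

def cluster_by_linkages_alt (linkages : List (List Int)) : List (Int × List Int) :=
  let st := linkages.foldl stepLinkB (PySem.Dict.empty, PySem.Dict.empty)
  let fin := st.1.keys.foldl
    (fun (acc : PySem.Dict Int (List Int) × PySem.Dict Int (List Int)) e =>
      let r := findB st.1 st.1.size e
      let comps := if acc.1.contains r then acc.1 else acc.1.insert r (PySem.Set.ofList (st.2.getD r []))
      (comps, acc.2.insert e (comps.getD r []))) (PySem.Dict.empty, PySem.Dict.empty)
  fin.2.items

-- ===== PRECONDITION & SPEC =====
-- Pre_ excludes inputs containing an empty linkage: there Python A raises ValueError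
-- (max() over an empty iterable) — and Python B raises the same ValueError.
def Pre_cluster_by_linkages (linkages : List (List Int)) : Prop :=
  ∀ l ∈ linkages, l ≠ []
instance (linkages : List (List Int)) : Decidable (Pre_cluster_by_linkages linkages) := by
  unfold Pre_cluster_by_linkages; infer_instance

def pvWitness_cluster_by_linkages : List (List Int) := [[1, 3], [1, 5], [2, 6], [3, 6, 9]]

def Spec_cluster_by_linkages (linkages : List (List Int)) (out : List (Int × List Int)) : Prop := out = cluster_by_linkages_alt linkages
instance (linkages : List (List Int)) (out : List (Int × List Int)) : Decidable (Spec_cluster_by_linkages linkages out) := by unfold Spec_cluster_by_linkages; infer_instance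

-- ===== CLAIM (what is proved, stated in full; the proofs are below) =====
def Claim_equal_cluster_by_linkages : Prop := ∀ (linkages : List (List Int)), Dom_cluster_by_linkages linkages → Pre_cluster_by_linkages linkages → Spec_cluster_by_linkages linkages (cluster_by_linkages linkages)

-- ===== LEMMAS AND PROOFS =====

-- ---------- find (parent-chain) theory ----------

def Decr (parent : PySem.Dict Int Int) (D : Int → Nat) : Prop :=
  ∀ x p, parent.get? x = some p → p ≠ x → p ∈ parent.keys ∧ D p < D x

def rootAt (parent : PySem.Dict Int Int) (D : Int → Nat) (x : Int) : Int :=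
  findB parent (D x + 1) x

theorem findB_succ (parent : PySem.Dict Int Int) (f : Nat) (x : Int) :
    findB parent (f + 1) x =
      (if parent.getD x x = x then x else findB parent f (parent.getD x x)) := rfl

theorem findB_of_fix (parent : PySem.Dict Int Int) (x : Int) (h : parent.getD x x = x) :
    ∀ f, findB parent f x = x := by
  intro f; cases f with
  | zero => rfl
  | succ f => rw [findB_succ, if_pos h]

theorem getD_step (parent : PySem.Dict Int Int) (x : Int) (h : parent.getD x x ≠ x) :
    parent.get? x = some (parent.getD x x) := by
  cases hx : parent.get? x with
  | none => exfalso; apply h; unfold PySem.Dict.getD; rw [hx]; rfl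
  | some p => unfold PySem.Dict.getD; rw [hx]; rfl

theorem rootAt_eq_self (parent : PySem.Dict Int Int) (D : Int → Nat) (x : Int)
    (h : parent.getD x x = x) : rootAt parent D x = x := findB_of_fix parent x h _

theorem findB_stable (parent : PySem.Dict Int Int) (D : Int → Nat) (hD : Decr parent D) :
    ∀ n x f, D x ≤ n → D x < f → findB parent f x = rootAt parent D x := by
  intro n
  induction n with
  | zero =>
    intro x f h0 hf
    by_cases hfix : parent.getD x x = x
    · rw [findB_of_fix _ _ hfix, rootAt_eq_self _ _ _ hfix]
    · obtain ⟨_, hlt⟩ := hD x _ (getD_step parent x hfix) hfix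
      omega
  | succ n ih =>
    intro x f h0 hf
    by_cases hfix : parent.getD x x = x
    · rw [findB_of_fix _ _ hfix, rootAt_eq_self _ _ _ hfix]
    · obtain ⟨_, hlt⟩ := hD x _ (getD_step parent x hfix) hfix
      cases f with
      | zero => omega
      | succ f =>
        rw [findB_succ, if_neg hfix]
        have h1 : findB parent f (parent.getD x x) = rootAt parent D (parent.getD x x) :=
          ih _ f (by omega) (by omega)
        have h2 : rootAt parent D x = rootAt parent D (parent.getD x x) := by
          have h3 : rootAt parent D x = findB parent (D x) (parent.getD x x) := by
            show findB parent (D x + 1) x = _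
            rw [findB_succ, if_neg hfix]
          rw [h3]; exact ih _ _ (by omega) (by omega)
        rw [h1, ← h2]

theorem rootAt_step' (parent : PySem.Dict Int Int) (D : Int → Nat) (hD : Decr parent D)
    (x : Int) (hfix : parent.getD x x ≠ x) :
    rootAt parent D x = rootAt parent D (parent.getD x x) := by
  obtain ⟨_, hlt⟩ := hD x _ (getD_step parent x hfix) hfix
  have h3 : rootAt parent D x = findB parent (D x) (parent.getD x x) := by
    show findB parent (D x + 1) x = _
    rw [findB_succ, if_neg hfix]
  rw [h3]; exact findB_stable parent D hD _ _ _ le_rfl (by omega)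

theorem rootAt_fix (parent : PySem.Dict Int Int) (D : Int → Nat) (hD : Decr parent D) (x : Int) :
    parent.getD (rootAt parent D x) (rootAt parent D x) = rootAt parent D x := by
  suffices h : ∀ n x, D x ≤ n →
      parent.getD (rootAt parent D x) (rootAt parent D x) = rootAt parent D x from h (D x) x le_rfl
  intro n
  induction n with
  | zero =>
    intro x h0
    by_cases hfix : parent.getD x x = x
    · rw [rootAt_eq_self _ _ _ hfix]; exact hfix
    · obtain ⟨_, hlt⟩ := hD x _ (getD_step parent x hfix) hfix; omega
  | succ n ih =>
    intro x h0
    by_cases hfix : parent.getD x x = x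
    · rw [rootAt_eq_self _ _ _ hfix]; exact hfix
    · obtain ⟨_, hlt⟩ := hD x _ (getD_step parent x hfix) hfix
      rw [rootAt_step' parent D hD x hfix]
      exact ih _ (by omega)

theorem rootAt_mem (parent : PySem.Dict Int Int) (D : Int → Nat) (hD : Decr parent D)
    (x : Int) (hx : x ∈ parent.keys) : rootAt parent D x ∈ parent.keys := by
  suffices h : ∀ n x, D x ≤ n → x ∈ parent.keys → rootAt parent D x ∈ parent.keys from
    h (D x) x le_rfl hx
  intro n
  induction n with
  | zero =>
    intro x h0 hx
    by_cases hfix : parent.getD x x = x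
    · rw [rootAt_eq_self _ _ _ hfix]; exact hx
    · obtain ⟨_, hlt⟩ := hD x _ (getD_step parent x hfix) hfix; omega
  | succ n ih =>
    intro x h0 hx
    by_cases hfix : parent.getD x x = x
    · rw [rootAt_eq_self _ _ _ hfix]; exact hx
    · obtain ⟨hm, hlt⟩ := hD x _ (getD_step parent x hfix) hfix
      rw [rootAt_step' parent D hD x hfix]
      exact ih _ (by omega) hm

theorem rootAt_not_mem (parent : PySem.Dict Int Int) (D : Int → Nat) (x : Int)
    (hx : x ∉ parent.keys) : rootAt parent D x = x := by
  apply rootAt_eq_self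
  unfold PySem.Dict.getD
  rw [(PySem.Dict.get?_eq_none_iff_not_mem_keys parent x).2 hx]; rfl

theorem get?_root (parent : PySem.Dict Int Int) (D : Int → Nat) (hD : Decr parent D)
    (x : Int) (hx : x ∈ parent.keys) :
    parent.get? (rootAt parent D x) = some (rootAt parent D x) := by
  have hfix := rootAt_fix parent D hD x
  have hmem := rootAt_mem parent D hD x hx
  cases hr : parent.get? (rootAt parent D x) with
  | none => exact absurd ((PySem.Dict.get?_eq_none_iff_not_mem_keys parent _).1 hr) (by simp [hmem])
  | some v => unfold PySem.Dict.getD at hfix; rw [hr] at hfix; simpa [hfix]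

theorem rootAt_step (parent : PySem.Dict Int Int) (D : Int → Nat) (hD : Decr parent D)
    (x p : Int) (h : parent.get? x = some p) : rootAt parent D p = rootAt parent D x := by
  have hgd : parent.getD x x = p := by unfold PySem.Dict.getD; rw [h]; rfl
  by_cases hpx : p = x
  · rw [hpx]
  · rw [rootAt_step' parent D hD x (by rw [hgd]; exact hpx), hgd]

theorem findB_insert_not_mem (parent : PySem.Dict Int Int) (D : Int → Nat) (hD : Decr parent D)
    (e r : Int) (he : e ∉ parent.keys) :
    ∀ f x, x ∈ parent.keys → findB (parent.insert e r) f x = findB parent f x := by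
  intro f
  induction f with
  | zero => intro x _; rfl
  | succ f ih =>
    intro x hx
    have hxe : x ≠ e := fun hh => he (hh ▸ hx)
    have hgd : (parent.insert e r).getD x x = parent.getD x x := by
      unfold PySem.Dict.getD; rw [PySem.Dict.get?_insert_of_ne parent r hxe]
    rw [findB_succ, findB_succ, hgd]
    by_cases hfix : parent.getD x x = x
    · rw [if_pos hfix, if_pos hfix]
    · rw [if_neg hfix, if_neg hfix]
      obtain ⟨hm, _⟩ := hD x _ (getD_step parent x hfix) hfix
      exact ih _ hm

theorem mem_keys_of_get? {ν : Type} (d : PySem.Dict Int ν) (k : Int) (v : ν)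
    (h : d.get? k = some v) : k ∈ d.keys := by
  by_contra hc
  rw [(PySem.Dict.get?_eq_none_iff_not_mem_keys d k).2 hc] at h
  simp at h

-- leaf insert: a fresh element e attached below a root r (or to itself when r = e)
theorem insert_fresh_decr (parent : PySem.Dict Int Int) (D : Int → Nat) (hD : Decr parent D)
    (e r : Int) (he : e ∉ parent.keys) (hr : r = e ∨ parent.get? r = some r) (n : Nat)
    (hn : r = e ∨ D r < n) :
    Decr (parent.insert e r) (fun y => if y = e then n else D y) := by
  intro x p hget hne
  by_cases hxe : x = e
  · subst hxe
    rw [PySem.Dict.get?_insert_self] at hget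
    cases hget
    have hre : r ≠ x := hne
    rcases hr with h | h
    · exact absurd h hre
    · rcases hn with h' | h'
      · exact absurd h' hre
      · refine ⟨(PySem.Dict.mem_keys_insert parent x r r).2 (Or.inr (mem_keys_of_get? _ _ _ h)), ?_⟩
        simpa [hre] using h'
  · rw [PySem.Dict.get?_insert_of_ne parent r hxe] at hget
    obtain ⟨hm, hlt⟩ := hD x p hget hne
    have hpe : p ≠ e := fun hh => he (hh ▸ hm)
    refine ⟨(PySem.Dict.mem_keys_insert parent e p r).2 (Or.inr hm), ?_⟩
    simp only [if_neg hpe, if_neg hxe]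
    exact hlt

theorem insert_fresh_rootAt_old (parent : PySem.Dict Int Int) (D : Int → Nat) (hD : Decr parent D)
    (e r : Int) (he : e ∉ parent.keys) (n : Nat) (x : Int) (hx : x ≠ e) :
    rootAt (parent.insert e r) (fun y => if y = e then n else D y) x = rootAt parent D x := by
  by_cases hmem : x ∈ parent.keys
  · show findB (parent.insert e r) ((if x = e then n else D x) + 1) x = _
    rw [if_neg hx, findB_insert_not_mem parent D hD e r he _ x hmem]
    rfl
  · have hx' : x ∉ (parent.insert e r).keys := by
      intro hc
      rcases (PySem.Dict.mem_keys_insert parent e x r).1 hc with h | h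
      · exact hx h
      · exact hmem h
    rw [rootAt_not_mem _ _ _ hx', rootAt_not_mem _ _ _ hmem]

theorem insert_fresh_rootAt_new (parent : PySem.Dict Int Int) (D : Int → Nat)
    (e r : Int) (he : e ∉ parent.keys) (hr : parent.get? r = some r) (n : Nat) (hn : 1 ≤ n) :
    rootAt (parent.insert e r) (fun y => if y = e then n else D y) e = r := by
  have hre : r ≠ e := fun hh => he (hh ▸ mem_keys_of_get? _ _ _ hr)
  show findB (parent.insert e r) ((if e = e then n else D e) + 1) e = r
  rw [if_pos rfl]
  cases n with
  | zero => omega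
  | succ n =>
    rw [findB_succ]
    have hgd : (parent.insert e r).getD e e = r := by
      unfold PySem.Dict.getD; rw [PySem.Dict.get?_insert_self]; rfl
    rw [hgd, if_neg hre]
    apply findB_of_fix
    unfold PySem.Dict.getD
    rw [PySem.Dict.get?_insert_of_ne parent r hre, hr]; rfl

theorem insert_self_rootAt (parent : PySem.Dict Int Int) (D : Int → Nat)
    (e : Int) (n : Nat) :
    rootAt (parent.insert e e) (fun y => if y = e then n else D y) e = e := by
  apply rootAt_eq_self
  unfold PySem.Dict.getD
  rw [PySem.Dict.get?_insert_self]; rfl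

-- merge: link root re below root rt
theorem merge_decr (parent : PySem.Dict Int Int) (D : Int → Nat) (hD : Decr parent D)
    (re rt : Int) (hre : parent.get? re = some re) (hrt : parent.get? rt = some rt)
    (hne : re ≠ rt) :
    Decr (parent.insert re rt)
      (fun y => if rootAt parent D y = re then D y + D rt + 1 else D y) := by
  have hfixre : parent.getD re re = re := by unfold PySem.Dict.getD; rw [hre]; rfl
  have hfixrt : parent.getD rt rt = rt := by unfold PySem.Dict.getD; rw [hrt]; rfl
  intro x p hget hne
  by_cases hxe : x = re
  · subst hxe
    rw [PySem.Dict.get?_insert_self] at hget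
    have hp : p = rt := by injection hget with hh; exact hh.symm
    subst hp
    refine ⟨(PySem.Dict.mem_keys_insert parent x p p).2 (Or.inr (mem_keys_of_get? _ _ _ hrt)), ?_⟩
    simp only [rootAt_eq_self parent D x hfixre, rootAt_eq_self parent D p hfixrt,
      if_neg (show ¬(p = x) from Ne.symm hne), if_true]
    omega
  · rw [PySem.Dict.get?_insert_of_ne parent rt hxe] at hget
    obtain ⟨hm, hlt⟩ := hD x p hget hne
    have hroot : rootAt parent D p = rootAt parent D x := rootAt_step parent D hD x p hget
    refine ⟨(PySem.Dict.mem_keys_insert parent re p rt).2 (Or.inr hm), ?_⟩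
    simp only [hroot]
    split_ifs <;> omega

theorem merge_rootAt (parent : PySem.Dict Int Int) (D : Int → Nat) (hD : Decr parent D)
    (re rt : Int) (hre : parent.get? re = some re) (hrt : parent.get? rt = some rt)
    (hne : re ≠ rt) (x : Int) :
    rootAt (parent.insert re rt)
        (fun y => if rootAt parent D y = re then D y + D rt + 1 else D y) x =
      (if rootAt parent D x = re then rt else rootAt parent D x) := by
  have hD' := merge_decr parent D hD re rt hre hrt hne
  have hfixre : parent.getD re re = re := by unfold PySem.Dict.getD; rw [hre]; rfl
  have hfixrt : parent.getD rt rt = rt := by unfold PySem.Dict.getD; rw [hrt]; rfl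
  have hfixrt' : (parent.insert re rt).getD rt rt = rt := by
    unfold PySem.Dict.getD
    rw [PySem.Dict.get?_insert_of_ne parent rt (Ne.symm hne), hrt]; rfl
  suffices h : ∀ n x, D x ≤ n →
      rootAt (parent.insert re rt)
          (fun y => if rootAt parent D y = re then D y + D rt + 1 else D y) x =
        (if rootAt parent D x = re then rt else rootAt parent D x) from h (D x) x le_rfl
  intro n
  induction n with
  | zero =>
    intro x h0
    by_cases hfix : parent.getD x x = x
    · by_cases hxe : x = re
      · subst hxe
        rw [rootAt_step' _ _ hD' x (by
            unfold PySem.Dict.getD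
            rw [PySem.Dict.get?_insert_self]
            exact Ne.symm hne)]
        have hgd : (parent.insert x rt).getD x x = rt := by
          unfold PySem.Dict.getD; rw [PySem.Dict.get?_insert_self]; rfl
        rw [hgd, rootAt_eq_self _ _ _ hfixrt', rootAt_eq_self _ _ _ hfix, if_pos rfl]
      · have hgd : (parent.insert re rt).getD x x = x := by
          unfold PySem.Dict.getD
          rw [PySem.Dict.get?_insert_of_ne parent rt hxe]
          unfold PySem.Dict.getD at hfix; exact hfix
        rw [rootAt_eq_self _ _ _ hgd, rootAt_eq_self _ _ _ hfix, if_neg hxe]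
    · obtain ⟨_, hlt⟩ := hD x _ (getD_step parent x hfix) hfix; omega
  | succ n ih =>
    intro x h0
    by_cases hfix : parent.getD x x = x
    · by_cases hxe : x = re
      · subst hxe
        rw [rootAt_step' _ _ hD' x (by
            unfold PySem.Dict.getD
            rw [PySem.Dict.get?_insert_self]
            exact Ne.symm hne)]
        have hgd : (parent.insert x rt).getD x x = rt := by
          unfold PySem.Dict.getD; rw [PySem.Dict.get?_insert_self]; rfl
        rw [hgd, rootAt_eq_self _ _ _ hfixrt', rootAt_eq_self _ _ _ hfix, if_pos rfl]
      · have hgd : (parent.insert re rt).getD x x = x := by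
          unfold PySem.Dict.getD
          rw [PySem.Dict.get?_insert_of_ne parent rt hxe]
          unfold PySem.Dict.getD at hfix; exact hfix
        rw [rootAt_eq_self _ _ _ hgd, rootAt_eq_self _ _ _ hfix, if_neg hxe]
    · have hxe : x ≠ re := by
        intro hh; rw [hh] at hfix; exact hfix hfixre
      have hget := getD_step parent x hfix
      obtain ⟨hm, hlt⟩ := hD x _ hget hfix
      have hgd : (parent.insert re rt).getD x x = parent.getD x x := by
        unfold PySem.Dict.getD
        rw [PySem.Dict.get?_insert_of_ne parent rt hxe]
      rw [rootAt_step' _ _ hD' x (by rw [hgd]; exact hfix)]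
      rw [hgd]
      rw [ih _ (by omega)]
      rw [rootAt_step' parent D hD x hfix]

-- ---------- Dict.erase lemmas ----------

theorem dict_get?_erase {ν : Type} (d : PySem.Dict Int ν) (k x : Int) :
    (d.erase k).get? x = if x = k then none else d.get? x := by
  obtain ⟨items⟩ := d
  induction items with
  | nil => simp only [PySem.Dict.erase, PySem.Dict.get?, List.filter_nil, List.find?_nil,
      Option.map_none]; split <;> rfl
  | cons p t ih =>
    obtain ⟨a, b⟩ := p
    simp only [PySem.Dict.erase, PySem.Dict.get?] at ih ⊢
    by_cases hak : a = k
    · subst hak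
      rw [List.filter_cons_of_neg (by simp)]
      rw [ih]
      by_cases hxk : x = a
      · subst hxk; rw [if_pos rfl, if_pos rfl]
      · rw [if_neg hxk, if_neg hxk, List.find?_cons_of_neg (by simpa using Ne.symm hxk)]
    · rw [List.filter_cons_of_pos (by simpa using hak)]
      by_cases hax : a = x
      · have hxk : ¬ x = k := by rw [← hax]; exact hak
        rw [List.find?_cons_of_pos (by simp [hax]), List.find?_cons_of_pos (by simp [hax]), if_neg hxk]
      · rw [List.find?_cons_of_neg (by simpa using hax), List.find?_cons_of_neg (by simpa using hax)]
        exact ih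

theorem dict_keys_erase {ν : Type} (d : PySem.Dict Int ν) (k : Int) :
    (d.erase k).keys = d.keys.filter (fun x => !(x == k)) := by
  obtain ⟨items⟩ := d
  induction items with
  | nil => rfl
  | cons p t ih =>
    obtain ⟨a, b⟩ := p
    simp only [PySem.Dict.erase, PySem.Dict.keys] at ih ⊢
    by_cases hak : a = k
    · subst hak
      rw [List.filter_cons_of_neg (by simp), List.map_cons, List.filter_cons_of_neg (by simp)]
      exact ih
    · rw [List.filter_cons_of_pos (by simpa using hak), List.map_cons, List.map_cons,
        List.filter_cons_of_pos (by simpa using hak)]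
      rw [ih]

-- ---------- max? lemmas ----------

def maxStep {α : Type} (k : α → Int) (acc : Option α) (x : α) : Option α :=
  match acc with
  | none => some x
  | some m => if k m < k x then some x else some m

theorem max?_eq_foldl {α : Type} (xs : List α) (k : α → Int) :
    PySem.List.max? xs k = xs.foldl (maxStep k) none := rfl

theorem max?_congr {α : Type} (xs : List α) (k1 k2 : α → Int)
    (h : ∀ x ∈ xs, k1 x = k2 x) : PySem.List.max? xs k1 = PySem.List.max? xs k2 := by
  have aux : ∀ (l : List α) (m0 : α), (∀ x ∈ l, k1 x = k2 x) → k1 m0 = k2 m0 →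
      l.foldl (maxStep k1) (some m0) = l.foldl (maxStep k2) (some m0) := by
    intro l
    induction l with
    | nil => intro m0 _ _; rfl
    | cons x t ih =>
      intro m0 hl h0
      have hx : k1 x = k2 x := hl x (List.mem_cons_self)
      simp only [List.foldl_cons]
      have hstep : maxStep k1 (some m0) x = maxStep k2 (some m0) x := by
        show (if k1 m0 < k1 x then some x else some m0) = (if k2 m0 < k2 x then some x else some m0)
        rw [hx, h0]
      have hv : maxStep k2 (some m0) x = (if k2 m0 < k2 x then some x else some m0) := rfl
      rw [hstep, hv]
      by_cases hc : k2 m0 < k2 x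
      · rw [if_pos hc]; exact ih x (fun y hy => hl y (List.mem_cons_of_mem _ hy)) hx
      · rw [if_neg hc]; exact ih m0 (fun y hy => hl y (List.mem_cons_of_mem _ hy)) h0
  cases xs with
  | nil => rfl
  | cons x t =>
    rw [max?_eq_foldl, max?_eq_foldl]
    simp only [List.foldl_cons]
    have h1 : maxStep k1 none x = some x := rfl
    have h2 : maxStep k2 none x = some x := rfl
    rw [h1, h2]
    exact aux t x (fun y hy => h y (List.mem_cons_of_mem _ hy)) (h x (List.mem_cons_self))

theorem max?_first {α : Type} (x : α) (t : List α) (k : α → Int) (m : α)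
    (hm : PySem.List.max? (x :: t) k = some m) (h : ∀ y ∈ t, k y ≤ k x) : m = x := by
  have aux : ∀ (l : List α) (m0 : α), (∀ y ∈ l, ¬ (k m0 < k y)) →
      l.foldl (maxStep k) (some m0) = some m0 := by
    intro l
    induction l with
    | nil => intro m0 _; rfl
    | cons y t ih =>
      intro m0 hl
      simp only [List.foldl_cons]
      have hstep : maxStep k (some m0) y = some m0 := by
        show (if k m0 < k y then some y else some m0) = some m0
        rw [if_neg (hl y (List.mem_cons_self))]
      rw [hstep]
      exact ih m0 (fun z hz => hl z (List.mem_cons_of_mem _ hz))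
  rw [max?_eq_foldl] at hm
  simp only [List.foldl_cons] at hm
  have h1 : maxStep k none x = some x := rfl
  rw [h1, aux t x (fun y hy => not_lt.2 (h y hy))] at hm
  injection hm with hh
  exact hh.symm

-- ---------- fold lemmas for A's merge loop ----------

theorem foldl_insert_get? (lid : Nat) :
    ∀ (l : List Int) (d : PySem.Dict Int Nat) (x : Int),
      (l.foldl (fun cm e => cm.insert e lid) d).get? x =
        if x ∈ l then some lid else d.get? x := by
  intro l
  induction l with
  | nil => intro d x; simp
  | cons e t ih =>
    intro d x
    simp only [List.foldl_cons]
    rw [ih]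
    by_cases hxt : x ∈ t
    · rw [if_pos hxt, if_pos (List.mem_cons_of_mem _ hxt)]
    · rw [if_neg hxt]
      by_cases hxe : x = e
      · subst hxe
        rw [PySem.Dict.get?_insert_self, if_pos List.mem_cons_self]
      · rw [PySem.Dict.get?_insert_of_ne d lid hxe,
          if_neg (by simp [hxe, hxt])]

theorem foldl_insert_keys (lid : Nat) :
    ∀ (l : List Int) (d : PySem.Dict Int Nat), (∀ x ∈ l, x ∈ d.keys) →
      (l.foldl (fun cm e => cm.insert e lid) d).keys = d.keys := by
  intro l
  induction l with
  | nil => intro d _; rfl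
  | cons e t ih =>
    intro d hd
    simp only [List.foldl_cons]
    rw [ih _ (fun x hx => by
      rw [PySem.Dict.keys_insert_of_contains d lid
        ((PySem.Dict.contains_iff_mem_keys d e).2 (hd e List.mem_cons_self))]
      exact hd x (List.mem_cons_of_mem _ hx))]
    exact PySem.Dict.keys_insert_of_contains d lid
      ((PySem.Dict.contains_iff_mem_keys d e).2 (hd e List.mem_cons_self))

theorem mergeA_fold (lid : Nat) :
    ∀ (l : List Int) (cmap : PySem.Dict Int Nat) (store : List (List Int)),
      lid < store.length → l.Nodup → (∀ x ∈ l, x ∉ store.getD lid []) →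
      l.foldl (mergeElemA lid) (cmap, store) =
        (l.foldl (fun cm e => cm.insert e lid) cmap,
         store.set lid (store.getD lid [] ++ l)) := by
  intro l
  induction l with
  | nil =>
    intro cmap store hlt _ _
    simp only [List.foldl_nil, List.append_nil]
    rw [List.getD_eq_getElem?_getD, List.getElem?_eq_getElem hlt]
    simp [List.set_getElem_self]
  | cons x t ih =>
    intro cmap store hlt hnd hdisj
    simp only [List.foldl_cons]
    have hx : x ∉ store.getD lid [] := hdisj x List.mem_cons_self
    have hstep : mergeElemA lid (cmap, store) x =
        (cmap.insert x lid, store.set lid (store.getD lid [] ++ [x])) := by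
      unfold mergeElemA
      rw [PySem.Set.add_of_not_mem hx]
    rw [hstep]
    rw [ih (cmap.insert x lid) (store.set lid (store.getD lid [] ++ [x]))
      (by simpa using hlt)
      (List.Nodup.of_cons hnd)
      (by
        intro y hy
        rw [List.getD_eq_getElem?_getD, List.getElem?_set_self hlt]
        simp only [Option.getD_some]
        intro hc
        rcases List.mem_append.1 hc with h | h
        · exact hdisj y (List.mem_cons_of_mem _ hy) h
        · rcases List.mem_singleton.1 h with rfl
          exact (List.nodup_cons.1 hnd).1 hy)]
    have hgd : (store.set lid (store.getD lid [] ++ [x])).getD lid [] =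
        store.getD lid [] ++ [x] := by
      rw [List.getD_eq_getElem?_getD, List.getElem?_set_self hlt]
      rfl
    rw [hgd, List.set_set]
    simp

-- ---------- the simulation invariant ----------

structure SimInv (cmap : PySem.Dict Int Nat) (store : List (List Int))
    (parent : PySem.Dict Int Int) (members : PySem.Dict Int (List Int))
    (D : Int → Nat) : Prop where
  pk_nodup : parent.keys.Nodup
  kdom : cmap.keys = parent.keys
  decr : Decr parent D
  bound : ∀ x ∈ parent.keys, D x < (members.getD (rootAt parent D x) []).length
  memdom : ∀ r, r ∈ members.keys ↔ parent.get? r = some r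
  mk_nodup : members.keys.Nodup
  memchar : ∀ r l, members.get? r = some l →
    ∀ x, x ∈ l ↔ (x ∈ parent.keys ∧ rootAt parent D x = r)
  memnodup : ∀ r l, members.get? r = some l → l.Nodup
  cm_lt : ∀ e i, cmap.get? e = some i → i < store.length
  cm_store : ∀ e i, cmap.get? e = some i →
    store.getD i [] = members.getD (rootAt parent D e) []
  cm_inj : ∀ e e' i i', cmap.get? e = some i → cmap.get? e' = some i' →
    (i = i' ↔ rootAt parent D e = rootAt parent D e')

structure InnerInv (cmap : PySem.Dict Int Nat) (store : List (List Int))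
    (parent : PySem.Dict Int Int) (members : PySem.Dict Int (List Int))
    (lid : Nat) (rt : Int) (D : Int → Nat) : Prop where
  base : SimInv cmap store parent members D
  lid_lt : lid < store.length
  rt_root : parent.get? rt = some rt
  store_lid : store.getD lid [] = members.getD rt []
  corr : ∀ e i, cmap.get? e = some i → (i = lid ↔ rootAt parent D e = rt)

-- derived facts

theorem SimInv.root_members {cmap store parent members D}
    (h : SimInv cmap store parent members D) {x : Int} (hx : x ∈ parent.keys) :
    ∃ l, members.get? (rootAt parent D x) = some l ∧
      members.getD (rootAt parent D x) [] = l ∧ l.Nodup ∧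
      (∀ y, y ∈ l ↔ (y ∈ parent.keys ∧ rootAt parent D y = rootAt parent D x)) := by
  have hroot := get?_root parent D h.decr x hx
  have hmemk : rootAt parent D x ∈ members.keys := (h.memdom _).2 hroot
  have hcont : members.contains (rootAt parent D x) = true :=
    (PySem.Dict.contains_iff_mem_keys members _).2 hmemk
  rw [PySem.Dict.contains_eq_isSome_get?] at hcont
  cases hml : members.get? (rootAt parent D x) with
  | none => rw [hml] at hcont; simp at hcont
  | some l =>
    refine ⟨l, rfl, ?_, h.memnodup _ _ hml, fun y => h.memchar _ _ hml y⟩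
    unfold PySem.Dict.getD; rw [hml]; rfl

theorem SimInv.bound_size {cmap store parent members D}
    (h : SimInv cmap store parent members D) :
    ∀ x ∈ parent.keys, D x < parent.size := by
  intro x hx
  obtain ⟨l, hml, hgd, hnd, hchar⟩ := h.root_members hx
  have hsub : ∀ y ∈ l, y ∈ parent.keys := fun y hy => ((hchar y).1 hy).1
  have hlen : l.length ≤ parent.keys.length :=
    (List.subperm_of_subset hnd hsub).length_le
  have hkeys : parent.keys.length = parent.size := by
    unfold PySem.Dict.keys PySem.Dict.size; rw [List.length_map]
  have hb := h.bound x hx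
  rw [hgd] at hb
  omega

theorem SimInv.find_size {cmap store parent members D}
    (h : SimInv cmap store parent members D) (x : Int) :
    findB parent parent.size x = rootAt parent D x := by
  by_cases hx : x ∈ parent.keys
  · exact findB_stable parent D h.decr (D x) x _ le_rfl (h.bound_size x hx)
  · have hfix : parent.getD x x = x := by
      unfold PySem.Dict.getD
      rw [(PySem.Dict.get?_eq_none_iff_not_mem_keys parent x).2 hx]; rfl
    rw [findB_of_fix _ _ hfix, rootAt_not_mem _ _ _ hx]

theorem SimInv.keyAB {cmap store parent members D}
    (h : SimInv cmap store parent members D) (e : Int) :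
    keyA cmap store e = keyB parent members e := by
  unfold keyA keyB
  cases hc : cmap.get? e with
  | none =>
    have he : e ∉ parent.keys := by
      rw [← h.kdom]
      exact (PySem.Dict.get?_eq_none_iff_not_mem_keys cmap e).1 hc
    rw [if_neg (by
      rw [PySem.Dict.contains_iff_mem_keys]
      exact he)]
  | some i =>
    have he : e ∈ cmap.keys := mem_keys_of_get? cmap e i hc
    have he' : e ∈ parent.keys := h.kdom ▸ he
    rw [if_pos ((PySem.Dict.contains_iff_mem_keys parent e).2 he')]
    show ((store.getD i []).length : Int) =
      ((members.getD (findB parent parent.size e) []).length : Int)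
    rw [h.find_size e, h.cm_store e i hc]

-- ---------- small dict/list helpers ----------

theorem getD_set_self {α : Type} (l : List α) (i : Nat) (v d : α) (h : i < l.length) :
    (l.set i v).getD i d = v := by
  rw [List.getD_eq_getElem?_getD, List.getElem?_set_self h]; rfl

theorem getD_set_ne {α : Type} (l : List α) (i j : Nat) (v d : α) (h : i ≠ j) :
    (l.set i v).getD j d = l.getD j d := by
  rw [List.getD_eq_getElem?_getD, List.getElem?_set_ne h, ← List.getD_eq_getElem?_getD]

theorem contains_eq_false_of_not_mem {ν : Type} (d : PySem.Dict Int ν) (k : Int)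
    (h : k ∉ d.keys) : d.contains k = false := by
  cases hb : d.contains k
  · rfl
  · exact absurd ((PySem.Dict.contains_iff_mem_keys d k).1 hb) h

theorem mem_keys_erase {ν : Type} (d : PySem.Dict Int ν) (k x : Int) :
    x ∈ (d.erase k).keys ↔ (x ∈ d.keys ∧ x ≠ k) := by
  rw [dict_keys_erase]; simp [List.mem_filter]

theorem nodup_keys_erase {ν : Type} (d : PySem.Dict Int ν) (k : Int) (h : d.keys.Nodup) :
    (d.erase k).keys.Nodup := by
  rw [dict_keys_erase]; exact h.filter _

-- ---------- the inner (per-element) step ----------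

theorem inner_step {cmap store parent members lid rt D}
    (h : InnerInv cmap store parent members lid rt D) (element : Int) :
    ∃ D', InnerInv (stepElemA lid (cmap, store) element).1 (stepElemA lid (cmap, store) element).2
      (stepElemB rt (parent, members) element).1 (stepElemB rt (parent, members) element).2
      lid rt D' := by
  obtain ⟨hsim, hlid, hrt, hsl, hcorr⟩ := h
  have hrtk : rt ∈ parent.keys := mem_keys_of_get? _ _ _ hrt
  have hrtfix : parent.getD rt rt = rt := by unfold PySem.Dict.getD; rw [hrt]; rfl
  have hrtroot : rootAt parent D rt = rt := rootAt_eq_self _ _ _ hrtfix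
  obtain ⟨lrt, hlrt, hlrtgd, hlrtnd, hlrtchar⟩ := hsim.root_members hrtk
  rw [hrtroot] at hlrt hlrtgd hlrtchar
  have hboundrt : D rt < lrt.length := by
    have hb := hsim.bound rt hrtk; rw [hrtroot, hlrtgd] at hb; exact hb
  cases hcm : cmap.get? element with
  | none =>
    -- Python: element not yet clustered; A appends it to the shared set, B attaches a leaf.
    have hel : element ∉ parent.keys := by
      rw [← hsim.kdom]
      exact (PySem.Dict.get?_eq_none_iff_not_mem_keys cmap element).1 hcm
    have helc : element ∉ cmap.keys := by rw [hsim.kdom]; exact hel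
    have hrne : rt ≠ element := fun hh => hel (hh ▸ hrtk)
    have hccf : cmap.contains element = false := contains_eq_false_of_not_mem _ _ helc
    have hpcf : parent.contains element = false := contains_eq_false_of_not_mem _ _ hel
    have helm : element ∉ members.getD rt [] := by
      rw [hlrtgd]; intro hc; exact hel ((hlrtchar element).1 hc).1
    have hadd : PySem.Set.add (store.getD lid []) element = store.getD lid [] ++ [element] :=
      PySem.Set.add_of_not_mem (by rw [hsl]; exact helm)
    have hA : stepElemA lid (cmap, store) element =
        (cmap.insert element lid, store.set lid (store.getD lid [] ++ [element])) := by
      unfold stepElemA; rw [hcm, hadd]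
    have hB : stepElemB rt (parent, members) element =
        (parent.insert element rt, members.insert rt (members.getD rt [] ++ [element])) := by
      unfold stepElemB; rw [if_pos hpcf]
    rw [hA, hB]
    refine ⟨(fun y => if y = element then D rt + 1 else D y), ?_⟩
    have hDecr' := insert_fresh_decr parent D hsim.decr element rt hel (Or.inr hrt)
      (D rt + 1) (Or.inr (Nat.lt_succ_self _))
    have hroot_old : ∀ x, x ≠ element →
        rootAt (parent.insert element rt) (fun y => if y = element then D rt + 1 else D y) x =
          rootAt parent D x :=
      fun x hx => insert_fresh_rootAt_old parent D hsim.decr element rt hel (D rt + 1) x hx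
    have hroot_new :
        rootAt (parent.insert element rt) (fun y => if y = element then D rt + 1 else D y) element =
          rt := insert_fresh_rootAt_new parent D element rt hel hrt (D rt + 1) (by omega)
    have hpkeys : (parent.insert element rt).keys = parent.keys ++ [element] :=
      PySem.Dict.keys_insert_of_not_contains parent rt hpcf
    have hckeys : (cmap.insert element lid).keys = cmap.keys ++ [element] :=
      PySem.Dict.keys_insert_of_not_contains cmap lid hccf
    have hmkrt : rt ∈ members.keys := (hsim.memdom rt).2 hrt
    have hmkeys : (members.insert rt (members.getD rt [] ++ [element])).keys = members.keys :=
      PySem.Dict.keys_insert_of_contains members _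
        ((PySem.Dict.contains_iff_mem_keys members rt).2 hmkrt)
    refine ⟨⟨?_, ?_, hDecr', ?_, ?_, ?_, ?_, ?_, ?_, ?_, ?_⟩, ?_, ?_, ?_, ?_⟩
    · -- pk_nodup
      exact PySem.Dict.nodup_keys_insert parent element rt hsim.pk_nodup
    · -- kdom
      rw [hckeys, hpkeys, hsim.kdom]
    · -- bound
      intro x hx
      rw [hpkeys] at hx
      rcases List.mem_append.1 hx with hx | hx
      · have hxe : x ≠ element := fun hh => hel (hh ▸ hx)
        rw [hroot_old x hxe]
        have hb := hsim.bound x hx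
        simp only [if_neg hxe]
        by_cases hxr : rootAt parent D x = rt
        · rw [hxr, PySem.Dict.getD_insert, if_pos rfl, List.length_append, hlrtgd]
          rw [hxr, hlrtgd] at hb
          simp only [List.length_singleton]
          omega
        · rw [PySem.Dict.getD_insert, if_neg hxr]
          exact hb
      · rcases List.mem_singleton.1 hx with rfl
        rw [hroot_new, PySem.Dict.getD_insert]
        rw [if_pos rfl, if_pos rfl, List.length_append, hlrtgd]
        simp only [List.length_singleton]
        omega
    · -- memdom
      intro r
      rw [hmkeys]
      by_cases hre : r = element
      · subst hre
        rw [PySem.Dict.get?_insert_self]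
        constructor
        · intro hc
          exact absurd (mem_keys_of_get? parent r r ((hsim.memdom r).1 hc)) hel
        · intro hc
          injection hc with hc
          exact absurd hc hrne
      · rw [PySem.Dict.get?_insert_of_ne parent rt hre]
        exact hsim.memdom r
    · -- mk_nodup
      rw [hmkeys]; exact hsim.mk_nodup
    · -- memchar
      intro r l hml x
      rw [PySem.Dict.get?_insert] at hml
      have hxmem : x ∈ (parent.insert element rt).keys ↔ (x = element ∨ x ∈ parent.keys) :=
        PySem.Dict.mem_keys_insert parent element x rt
      by_cases hre : r = rt
      · subst hre
        rw [if_pos rfl] at hml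
        injection hml with hml
        subst hml
        constructor
        · intro hx
          rcases List.mem_append.1 hx with hx | hx
          · rw [hlrtgd] at hx
            have := (hlrtchar x).1 hx
            have hxe : x ≠ element := fun hh => hel (hh ▸ this.1)
            exact ⟨hxmem.2 (Or.inr this.1), by rw [hroot_old x hxe]; exact this.2⟩
          · rcases List.mem_singleton.1 hx with rfl
            exact ⟨hxmem.2 (Or.inl rfl), hroot_new⟩
        · intro ⟨hx1, hx2⟩
          by_cases hxe : x = element
          · subst hxe; exact List.mem_append.2 (Or.inr (List.mem_singleton.2 rfl))
          · rw [hroot_old x hxe] at hx2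
            rcases hxmem.1 hx1 with hh | hh
            · exact absurd hh hxe
            · exact List.mem_append.2 (Or.inl (by rw [hlrtgd]; exact (hlrtchar x).2 ⟨hh, hx2⟩))
      · rw [if_neg hre] at hml
        have hold := hsim.memchar r l hml x
        constructor
        · intro hx
          have := hold.1 hx
          have hxe : x ≠ element := fun hh => hel (hh ▸ this.1)
          exact ⟨hxmem.2 (Or.inr this.1), by rw [hroot_old x hxe]; exact this.2⟩
        · intro ⟨hx1, hx2⟩
          by_cases hxe : x = element
          · subst hxe
            rw [hroot_new] at hx2
            exact absurd hx2.symm hre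
          · rw [hroot_old x hxe] at hx2
            rcases hxmem.1 hx1 with hh | hh
            · exact absurd hh hxe
            · exact hold.2 ⟨hh, hx2⟩
    · -- memnodup
      intro r l hml
      rw [PySem.Dict.get?_insert] at hml
      by_cases hre : r = rt
      · subst hre
        rw [if_pos rfl] at hml
        injection hml with hml
        subst hml
        rw [hlrtgd]
        refine List.Nodup.append hlrtnd (List.nodup_singleton _) ?_
        intro a ha hb
        rcases List.mem_singleton.1 hb with rfl
        exact hel ((hlrtchar _).1 ha).1
      · rw [if_neg hre] at hml
        exact hsim.memnodup r l hml
    · -- cm_lt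
      intro e i hce
      rw [PySem.Dict.get?_insert] at hce
      rw [List.length_set]
      by_cases hee : e = element
      · rw [if_pos hee] at hce; injection hce with hce; subst hce; exact hlid
      · rw [if_neg hee] at hce; exact hsim.cm_lt e i hce
    · -- cm_store
      intro e i hce
      rw [PySem.Dict.get?_insert] at hce
      by_cases hee : e = element
      · rw [if_pos hee] at hce
        injection hce with hce
        subst hce
        subst hee
        rw [hroot_new, getD_set_self _ _ _ _ hlid, PySem.Dict.getD_insert, if_pos rfl, hsl]
      · rw [if_neg hee] at hce
        rw [hroot_old e hee]
        by_cases hie : i = lid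
        · subst hie
          have hre : rootAt parent D e = rt := (hcorr e i hce).1 rfl
          rw [hre, getD_set_self _ _ _ _ hlid, PySem.Dict.getD_insert, if_pos rfl, hsl]
        · have hre : rootAt parent D e ≠ rt := fun hh => hie ((hcorr e i hce).2 hh)
          rw [getD_set_ne _ _ _ _ _ (fun hh => hie hh.symm),
            PySem.Dict.getD_insert, if_neg hre]
          exact hsim.cm_store e i hce
    · -- cm_inj
      intro e e' i i' hce hce'
      rw [PySem.Dict.get?_insert] at hce hce'
      by_cases hee : e = element <;> by_cases hee' : e' = element
      · rw [if_pos hee] at hce; rw [if_pos hee'] at hce'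
        injection hce with hce; injection hce' with hce'
        subst hce; subst hce'; subst hee; subst hee'
        simp
      · rw [if_pos hee] at hce; rw [if_neg hee'] at hce'
        injection hce with hce
        subst hce; subst hee
        rw [hroot_new, hroot_old e' hee']
        constructor
        · intro hh; exact ((hcorr e' i' hce').1 hh.symm).symm
        · intro hh; exact ((hcorr e' i' hce').2 hh.symm).symm
      · rw [if_neg hee] at hce; rw [if_pos hee'] at hce'
        injection hce' with hce'
        subst hce'; subst hee'
        rw [hroot_new, hroot_old e hee]
        exact hcorr e i hce
      · rw [if_neg hee] at hce; rw [if_neg hee'] at hce'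
        rw [hroot_old e hee, hroot_old e' hee']
        exact hsim.cm_inj e e' i i' hce hce'
    · -- lid_lt
      rw [List.length_set]; exact hlid
    · -- rt_root
      rw [PySem.Dict.get?_insert_of_ne parent rt hrne]; exact hrt
    · -- store_lid
      rw [getD_set_self _ _ _ _ hlid, PySem.Dict.getD_insert, if_pos rfl, hsl]
    · -- corr
      intro e i hce
      rw [PySem.Dict.get?_insert] at hce
      by_cases hee : e = element
      · rw [if_pos hee] at hce
        injection hce with hce
        subst hce; subst hee
        rw [hroot_new]
        simp
      · rw [if_neg hee] at hce
        rw [hroot_old e hee]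
        exact hcorr e i hce
  | some j =>
    have helk : element ∈ cmap.keys := mem_keys_of_get? _ _ _ hcm
    have help : element ∈ parent.keys := hsim.kdom ▸ helk
    have hct : parent.contains element = true :=
      (PySem.Dict.contains_iff_mem_keys parent element).2 help
    have hfind : findB parent parent.size element = rootAt parent D element := hsim.find_size element
    by_cases hj : j = lid
    · -- element already in the current cluster: both sides skip
      have hre : rootAt parent D element = rt := (hcorr element j hcm).1 hj
      have hA : stepElemA lid (cmap, store) element = (cmap, store) := by
        unfold stepElemA
        simp only [hcm]
        simp [hj]
      have hB : stepElemB rt (parent, members) element = (parent, members) := by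
        unfold stepElemB
        rw [if_neg (by rw [hct]; simp), hfind, hre, if_neg (by simp)]
      rw [hA, hB]
      exact ⟨D, ⟨hsim, hlid, hrt, hsl, hcorr⟩⟩
    · -- element's cluster is merged into the current one
      obtain ⟨lre, hlre, hlregd, hlrend, hlrechar⟩ := hsim.root_members help
      set re := rootAt parent D element with hredef
      have hrene : re ≠ rt := fun hh => hj ((hcorr element j hcm).2 hh)
      have hrek : re ∈ parent.keys := rootAt_mem parent D hsim.decr element help
      have hreroot : parent.get? re = some re := get?_root parent D hsim.decr element help
      have hstorej : store.getD j [] = lre := by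
        rw [hsim.cm_store element j hcm, ← hredef, hlregd]
      have hstorelid : store.getD lid [] = lrt := by rw [hsl, hlrtgd]
      have hdisj : ∀ x ∈ lre, x ∉ lrt := by
        intro x hx hx'
        exact hrene (((hlrechar x).1 hx).2.symm.trans ((hlrtchar x).1 hx').2)
      have hsub : ∀ x ∈ lre, x ∈ cmap.keys := by
        intro x hx
        rw [hsim.kdom]
        exact ((hlrechar x).1 hx).1
      have hA : stepElemA lid (cmap, store) element =
          (lre.foldl (fun cm e => cm.insert e lid) cmap,
           store.set lid (lrt ++ lre)) := by
        unfold stepElemA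
        simp only [hcm]
        rw [if_pos hj]
        rw [hstorej,
          mergeA_fold lid lre cmap store hlid hlrend (by
            intro x hx
            rw [hstorelid]
            exact hdisj x hx), hstorelid]
      have hB : stepElemB rt (parent, members) element =
          (parent.insert re rt, (members.erase re).insert rt (lrt ++ lre)) := by
        unfold stepElemB
        rw [if_neg (by rw [hct]; simp), hfind, if_pos hrene, hlrtgd, hlregd]
      rw [hA, hB]
      refine ⟨(fun y => if rootAt parent D y = re then D y + D rt + 1 else D y), ?_⟩
      have hDecr' := merge_decr parent D hsim.decr re rt hreroot hrt hrene
      have hroots := merge_rootAt parent D hsim.decr re rt hreroot hrt hrene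
      have hpkeys : (parent.insert re rt).keys = parent.keys :=
        PySem.Dict.keys_insert_of_contains parent rt
          ((PySem.Dict.contains_iff_mem_keys parent re).2 hrek)
      have hckeys : (lre.foldl (fun cm e => cm.insert e lid) cmap).keys = cmap.keys :=
        foldl_insert_keys lid lre cmap hsub
      have hcget : ∀ x, (lre.foldl (fun cm e => cm.insert e lid) cmap).get? x =
          if x ∈ lre then some lid else cmap.get? x := fun x => foldl_insert_get? lid lre cmap x
      have hmkre : rt ∈ (members.erase re).keys := by
        rw [mem_keys_erase]
        exact ⟨(hsim.memdom rt).2 hrt, Ne.symm hrene⟩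
      have hmget : ∀ x, ((members.erase re).insert rt (lrt ++ lre)).get? x =
          if x = rt then some (lrt ++ lre) else if x = re then none else members.get? x := by
        intro x
        rw [PySem.Dict.get?_insert]
        by_cases hx : x = rt
        · rw [if_pos hx, if_pos hx]
        · rw [if_neg hx, if_neg hx, dict_get?_erase]
      have hmkeys : ((members.erase re).insert rt (lrt ++ lre)).keys = (members.erase re).keys :=
        PySem.Dict.keys_insert_of_contains _ _
          ((PySem.Dict.contains_iff_mem_keys _ rt).2 hmkre)
      have hner' : ∀ x i, x ∉ lre → cmap.get? x = some i → rootAt parent D x ≠ re := by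
        intro x i hx hcx hh
        have hxk : x ∈ cmap.keys := mem_keys_of_get? _ _ _ hcx
        exact hx ((hlrechar x).2 ⟨hsim.kdom ▸ hxk, hh⟩)
      have hlen : ∀ x ∈ parent.keys, rootAt parent D x = re → D x < lre.length := by
        intro x hx hh
        have hb := hsim.bound x hx
        rw [hh, hlregd] at hb
        exact hb
      refine ⟨⟨?_, ?_, hDecr', ?_, ?_, ?_, ?_, ?_, ?_, ?_, ?_⟩, ?_, ?_, ?_, ?_⟩
      · -- pk_nodup
        rw [hpkeys]; exact hsim.pk_nodup
      · -- kdom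
        rw [hckeys, hpkeys]; exact hsim.kdom
      · -- bound
        intro x hx
        rw [hpkeys] at hx
        rw [hroots x]
        by_cases hxr : rootAt parent D x = re
        · rw [if_pos hxr, if_pos hxr]
          unfold PySem.Dict.getD
          rw [hmget rt, if_pos rfl]
          simp only [Option.getD_some, List.length_append]
          have h1 := hlen x hx hxr
          have h2 : lrt.length = (members.getD rt []).length := by rw [hlrtgd]
          omega
        · rw [if_neg hxr, if_neg hxr]
          have hb := hsim.bound x hx
          by_cases hxt : rootAt parent D x = rt
          · rw [hxt]
            unfold PySem.Dict.getD
            rw [hmget rt, if_pos rfl]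
            simp only [Option.getD_some, List.length_append]
            rw [hxt, hlrtgd] at hb
            omega
          · unfold PySem.Dict.getD
            rw [hmget _, if_neg hxt, if_neg hxr]
            have hb' := hb
            unfold PySem.Dict.getD at hb'
            exact hb'
      · -- memdom
        intro r
        rw [hmkeys, mem_keys_erase]
        by_cases hxe : r = re
        · subst hxe
          rw [PySem.Dict.get?_insert_self]
          constructor
          · intro hcc
            exact absurd rfl hcc.2
          · intro hcc
            injection hcc with hcc
            exact absurd hcc.symm hrene
        · rw [PySem.Dict.get?_insert_of_ne parent rt hxe, hsim.memdom r]
          constructor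
          · intro hcc; exact hcc.1
          · intro hcc; exact ⟨hcc, hxe⟩
      · -- mk_nodup
        rw [hmkeys]; exact nodup_keys_erase members re hsim.mk_nodup
      · -- memchar
        intro r l hml x
        rw [hmget r] at hml
        by_cases hxt : r = rt
        · subst hxt
          rw [if_pos rfl] at hml
          injection hml with hml
          subst hml
          rw [hpkeys, hroots x]
          constructor
          · intro hx
            rcases List.mem_append.1 hx with hx | hx
            · have hq := (hlrtchar x).1 hx
              refine ⟨hq.1, ?_⟩
              rw [hq.2, if_neg (Ne.symm hrene)]
            · have hq := (hlrechar x).1 hx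
              exact ⟨hq.1, by rw [hq.2, if_pos rfl]⟩
          · intro hx
            obtain ⟨hx1, hx2⟩ := hx
            by_cases hxr : rootAt parent D x = re
            · exact List.mem_append.2 (Or.inr ((hlrechar x).2 ⟨hx1, hxr⟩))
            · rw [if_neg hxr] at hx2
              exact List.mem_append.2 (Or.inl ((hlrtchar x).2 ⟨hx1, hx2⟩))
        · rw [if_neg hxt] at hml
          by_cases hxe : r = re
          · rw [if_pos hxe] at hml; exact absurd hml (by simp)
          · rw [if_neg hxe] at hml
            have hold := hsim.memchar r l hml x
            rw [hpkeys, hroots x]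
            constructor
            · intro hx
              have hq := hold.1 hx
              refine ⟨hq.1, ?_⟩
              rw [if_neg (by rw [hq.2]; exact fun hh => hxe (hh.symm ▸ rfl))]
              exact hq.2
            · intro hx
              obtain ⟨hx1, hx2⟩ := hx
              by_cases hxr : rootAt parent D x = re
              · rw [if_pos hxr] at hx2
                exact absurd hx2.symm hxt
              · rw [if_neg hxr] at hx2
                exact hold.2 ⟨hx1, hx2⟩
      · -- memnodup
        intro r l hml
        rw [hmget r] at hml
        by_cases hxt : r = rt
        · rw [if_pos hxt] at hml
          injection hml with hml
          subst hml
          refine List.Nodup.append hlrtnd hlrend ?_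
          intro a ha hb
          exact hdisj a hb ha
        · rw [if_neg hxt] at hml
          by_cases hxe : r = re
          · rw [if_pos hxe] at hml; exact absurd hml (by simp)
          · rw [if_neg hxe] at hml
            exact hsim.memnodup r l hml
      · -- cm_lt
        intro e i hce
        rw [hcget e] at hce
        rw [List.length_set]
        by_cases hee : e ∈ lre
        · rw [if_pos hee] at hce; injection hce with hce; subst hce; exact hlid
        · rw [if_neg hee] at hce; exact hsim.cm_lt e i hce
      · -- cm_store
        intro e i hce
        rw [hcget e] at hce
        by_cases hee : e ∈ lre
        · rw [if_pos hee] at hce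
          injection hce with hce
          subst hce
          have heroot : rootAt parent D e = re := ((hlrechar e).1 hee).2
          rw [hroots e, if_pos heroot, getD_set_self _ _ _ _ hlid]
          unfold PySem.Dict.getD
          rw [hmget rt, if_pos rfl]
          rfl
        · rw [if_neg hee] at hce
          have hroote : rootAt parent D e ≠ re := hner' e i hee hce
          rw [hroots e, if_neg hroote]
          by_cases hie : i = lid
          · subst hie
            have hroott : rootAt parent D e = rt := (hcorr e i hce).1 rfl
            rw [hroott, getD_set_self _ _ _ _ hlid]
            unfold PySem.Dict.getD
            rw [hmget rt, if_pos rfl]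
            rfl
          · have hroott : rootAt parent D e ≠ rt := fun hh => hie ((hcorr e i hce).2 hh)
            rw [getD_set_ne _ _ _ _ _ (fun hh => hie hh.symm)]
            unfold PySem.Dict.getD
            rw [hmget _, if_neg hroott, if_neg hroote]
            have hq := hsim.cm_store e i hce
            unfold PySem.Dict.getD at hq
            exact hq
      · -- cm_inj
        intro e e' i i' hce hce'
        rw [hcget e] at hce
        rw [hcget e'] at hce'
        rw [hroots e, hroots e']
        by_cases hee : e ∈ lre <;> by_cases hee' : e' ∈ lre
        · rw [if_pos hee] at hce; rw [if_pos hee'] at hce'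
          injection hce with hce; injection hce' with hce'
          subst hce; subst hce'
          rw [if_pos (show rootAt parent D e = re from ((hlrechar e).1 hee).2),
            if_pos (show rootAt parent D e' = re from ((hlrechar e').1 hee').2)]
          simp
        · rw [if_pos hee] at hce; rw [if_neg hee'] at hce'
          injection hce with hce
          subst hce
          rw [if_pos (show rootAt parent D e = re from ((hlrechar e).1 hee).2),
            if_neg (hner' e' i' hee' hce')]
          constructor
          · intro hh
            exact ((hcorr e' i' hce').1 hh.symm).symm
          · intro hh
            exact ((hcorr e' i' hce').2 hh.symm).symm
        · rw [if_neg hee] at hce; rw [if_pos hee'] at hce'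
          injection hce' with hce'
          subst hce'
          rw [if_neg (hner' e i hee hce),
            if_pos (show rootAt parent D e' = re from ((hlrechar e').1 hee').2)]
          exact hcorr e i hce
        · rw [if_neg hee] at hce; rw [if_neg hee'] at hce'
          rw [if_neg (hner' e i hee hce), if_neg (hner' e' i' hee' hce')]
          exact hsim.cm_inj e e' i i' hce hce'
      · -- lid_lt
        rw [List.length_set]; exact hlid
      · -- rt_root
        rw [PySem.Dict.get?_insert_of_ne parent rt (Ne.symm hrene)]; exact hrt
      · -- store_lid
        rw [getD_set_self _ _ _ _ hlid]
        unfold PySem.Dict.getD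
        rw [hmget rt, if_pos rfl]
        rfl
      · -- corr
        intro e i hce
        rw [hcget e] at hce
        rw [hroots e]
        by_cases hee : e ∈ lre
        · rw [if_pos hee] at hce
          injection hce with hce
          subst hce
          rw [if_pos (show rootAt parent D e = re from ((hlrechar e).1 hee).2)]
          simp
        · rw [if_neg hee] at hce
          rw [if_neg (hner' e i hee hce)]
          exact hcorr e i hce

theorem inner_fold {cmap store parent members lid rt D}
    (h : InnerInv cmap store parent members lid rt D) (linkage : List Int) :
    ∃ D', InnerInv (linkage.foldl (stepElemA lid) (cmap, store)).1
      (linkage.foldl (stepElemA lid) (cmap, store)).2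
      (linkage.foldl (stepElemB rt) (parent, members)).1
      (linkage.foldl (stepElemB rt) (parent, members)).2
      lid rt D' := by
  induction linkage generalizing cmap store parent members D with
  | nil => exact ⟨D, h⟩
  | cons x t ih =>
    simp only [List.foldl_cons]
    obtain ⟨D1, h1⟩ := inner_step h x
    exact ih h1

-- ---------- the per-linkage step ----------

theorem link_step {cmap store parent members D}
    (h : SimInv cmap store parent members D) (linkage : List Int) :
    ∃ D', SimInv (stepLinkA (cmap, store) linkage).1 (stepLinkA (cmap, store) linkage).2
      (stepLinkB (parent, members) linkage).1 (stepLinkB (parent, members) linkage).2 D' := by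
  have hkey : PySem.List.max? linkage (keyA cmap store) =
      PySem.List.max? linkage (keyB parent members) :=
    max?_congr linkage _ _ (fun x _ => h.keyAB x)
  cases hmax : PySem.List.max? linkage (keyA cmap store) with
  | none =>
    have hmax' : PySem.List.max? linkage (keyB parent members) = none := by
      rw [← hkey]; exact hmax
    have hA : stepLinkA (cmap, store) linkage = (cmap, store) := by
      unfold stepLinkA; rw [hmax]
    have hB : stepLinkB (parent, members) linkage = (parent, members) := by
      unfold stepLinkB; rw [hmax']
    rw [hA, hB]
    exact ⟨D, h⟩
  | some m =>
    have hmax' : PySem.List.max? linkage (keyB parent members) = some m := by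
      rw [← hkey]; exact hmax
    cases hcm : cmap.get? m with
    | some lid =>
      have hmem : m ∈ parent.keys := h.kdom ▸ mem_keys_of_get? _ _ _ hcm
      have hct : parent.contains m = true :=
        (PySem.Dict.contains_iff_mem_keys parent m).2 hmem
      have hA : stepLinkA (cmap, store) linkage =
          linkage.foldl (stepElemA lid) (cmap, store) := by
        unfold stepLinkA
        rw [hmax]
        simp only [hcm]
      have hB : stepLinkB (parent, members) linkage =
          linkage.foldl (stepElemB (rootAt parent D m)) (parent, members) := by
        unfold stepLinkB
        simp only [hmax']
        rw [if_pos hct, h.find_size m]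
      rw [hA, hB]
      have hinner : InnerInv cmap store parent members lid (rootAt parent D m) D :=
        ⟨h, h.cm_lt m lid hcm, get?_root parent D h.decr m hmem, h.cm_store m lid hcm,
         fun e i hce => h.cm_inj e m i lid hce hcm⟩
      obtain ⟨D', h'⟩ := inner_fold hinner linkage
      exact ⟨D', h'.base⟩
    | none =>
      -- fresh anchor: all linkage elements are new and the anchor is the first element
      have hm : m ∉ parent.keys := by
        rw [← h.kdom]
        exact (PySem.Dict.get?_eq_none_iff_not_mem_keys cmap m).1 hcm
      have hpcf : parent.contains m = false := contains_eq_false_of_not_mem _ _ hm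
      have hccf : cmap.contains m = false :=
        contains_eq_false_of_not_mem _ _ (by rw [h.kdom]; exact hm)
      have hkey0 : ∀ y ∈ linkage, keyA cmap store y = 0 := by
        intro y hy
        cases hcy : cmap.get? y with
        | none => unfold keyA; rw [hcy]
        | some i =>
          exfalso
          have hyk : y ∈ parent.keys := h.kdom ▸ mem_keys_of_get? _ _ _ hcy
          obtain ⟨ly, hly, hlygd, _, hlychar⟩ := h.root_members hyk
          have hymem : y ∈ ly := (hlychar y).2 ⟨hyk, rfl⟩
          have hle := PySem.List.max?_isMax hmax y hy
          have hm0 : keyA cmap store m = 0 := by unfold keyA; rw [hcm]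
          have hka : keyA cmap store y = ((store.getD i []).length : Int) := by
            unfold keyA; rw [hcy]
          rw [hm0, hka, h.cm_store y i hcy, hlygd] at hle
          have hpos : 0 < ly.length := List.length_pos_of_mem hymem
          omega
      cases hlk : linkage with
      | nil =>
        rw [hlk] at hmax
        simp [PySem.List.max?] at hmax
      | cons x rest =>
        subst hlk
        have hmx : m = x := max?_first x rest (keyA cmap store) m hmax (by
          intro y hy
          rw [hkey0 y (List.mem_cons_of_mem _ hy), hkey0 x List.mem_cons_self])
        subst hmx
        have hA : stepLinkA (cmap, store) (m :: rest) =
            rest.foldl (stepElemA store.length)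
              (cmap.insert m store.length, (store ++ [[]]).set store.length [m]) := by
          unfold stepLinkA
          rw [hmax]
          simp only [hcm]
          rw [List.foldl_cons]
          have hstep : stepElemA store.length (cmap, store ++ [[]]) m =
              (cmap.insert m store.length, (store ++ [[]]).set store.length [m]) := by
            unfold stepElemA
            simp only [hcm]
            have hgd : (store ++ [[]]).getD store.length [] = ([] : List Int) := by
              rw [List.getD_eq_getElem?_getD, List.getElem?_concat_length]; rfl
            rw [hgd]
            rfl
          rw [hstep]
        have hB : stepLinkB (parent, members) (m :: rest) =
            rest.foldl (stepElemB m) (parent.insert m m, members.insert m [m]) := by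
          unfold stepLinkB
          simp only [hmax']
          rw [if_neg (by rw [hpcf]; simp), List.foldl_cons]
          have hfix1 : (parent.insert m m).getD m m = m := by
            unfold PySem.Dict.getD; rw [PySem.Dict.get?_insert_self]; rfl
          have hc1 : (parent.insert m m).contains m = true := by
            rw [PySem.Dict.contains_iff_mem_keys]
            exact (PySem.Dict.mem_keys_insert parent m m m).2 (Or.inl rfl)
          have hstep : stepElemB m (parent.insert m m, members.insert m [m]) m =
              (parent.insert m m, members.insert m [m]) := by
            unfold stepElemB
            rw [if_neg (by rw [hc1]; simp), findB_of_fix _ _ hfix1, if_neg (by simp)]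
          rw [hstep]
        rw [hA, hB]
        have hDecr1 := insert_fresh_decr parent D h.decr m m hm (Or.inl rfl) 0 (Or.inl rfl)
        have hroot_old : ∀ x, x ≠ m →
            rootAt (parent.insert m m) (fun y => if y = m then 0 else D y) x =
              rootAt parent D x :=
          fun x hx => insert_fresh_rootAt_old parent D h.decr m m hm 0 x hx
        have hroot_new :
            rootAt (parent.insert m m) (fun y => if y = m then 0 else D y) m = m :=
          insert_self_rootAt parent D m 0
        have hpkeys : (parent.insert m m).keys = parent.keys ++ [m] :=
          PySem.Dict.keys_insert_of_not_contains parent m hpcf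
        have hckeys : (cmap.insert m store.length).keys = cmap.keys ++ [m] :=
          PySem.Dict.keys_insert_of_not_contains cmap _ hccf
        have hmnotk : m ∉ members.keys := by
          intro hc
          exact hm (mem_keys_of_get? parent m m ((h.memdom m).1 hc))
        have hmcf : members.contains m = false := contains_eq_false_of_not_mem _ _ hmnotk
        have hmkeys : (members.insert m [m]).keys = members.keys ++ [m] :=
          PySem.Dict.keys_insert_of_not_contains members _ hmcf
        have hroot_mem : ∀ x ∈ parent.keys, rootAt parent D x ≠ m :=
          fun x hx hh => hm (hh ▸ rootAt_mem parent D h.decr x hx)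
        have hlid1 : store.length < ((store ++ [[]]).set store.length [m]).length := by
          rw [List.length_set, List.length_append]; simp
        have hsgd : ((store ++ [[]]).set store.length [m]).getD store.length [] = [m] :=
          getD_set_self _ _ _ _ (by rw [List.length_append]; simp)
        have hsgdi : ∀ i : Nat, i < store.length →
            ((store ++ [[]]).set store.length [m]).getD i [] = store.getD i [] := by
          intro i hi
          rw [getD_set_ne _ _ _ _ _ (by omega)]
          rw [List.getD_eq_getElem?_getD, List.getElem?_append_left hi, ← List.getD_eq_getElem?_getD]
        have hinner : InnerInv (cmap.insert m store.length)
            ((store ++ [[]]).set store.length [m]) (parent.insert m m)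
            (members.insert m [m]) store.length m (fun y => if y = m then 0 else D y) := by
          refine ⟨⟨?_, ?_, hDecr1, ?_, ?_, ?_, ?_, ?_, ?_, ?_, ?_⟩, hlid1, ?_, ?_, ?_⟩
          · exact PySem.Dict.nodup_keys_insert parent m m h.pk_nodup
          · rw [hckeys, hpkeys, h.kdom]
          · -- bound
            intro x hx
            rw [hpkeys] at hx
            rcases List.mem_append.1 hx with hx | hx
            · have hxe : x ≠ m := fun hh => hm (hh ▸ hx)
              rw [hroot_old x hxe]
              simp only [if_neg hxe]
              rw [PySem.Dict.getD_insert, if_neg (hroot_mem x hx)]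
              exact h.bound x hx
            · rcases List.mem_singleton.1 hx with rfl
              rw [hroot_new, PySem.Dict.getD_insert, if_pos rfl, if_pos rfl]
              simp
          · -- memdom
            intro r
            rw [hmkeys]
            by_cases hrm : r = m
            · subst hrm
              rw [PySem.Dict.get?_insert_self]
              simp [List.mem_append]
            · rw [PySem.Dict.get?_insert_of_ne parent m hrm]
              constructor
              · intro hc
                rcases List.mem_append.1 hc with hc | hc
                · exact (h.memdom r).1 hc
                · exact absurd (List.mem_singleton.1 hc) hrm
              · intro hc
                exact List.mem_append.2 (Or.inl ((h.memdom r).2 hc))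
          · exact PySem.Dict.nodup_keys_insert members m [m] h.mk_nodup
          · -- memchar
            intro r l hml x
            rw [PySem.Dict.get?_insert] at hml
            by_cases hrm : r = m
            · rw [if_pos hrm] at hml
              injection hml with hml
              subst hml
              rw [hrm]
              constructor
              · intro hx
                rcases List.mem_singleton.1 hx with rfl
                exact ⟨by rw [hpkeys]; exact List.mem_append.2 (Or.inr (List.mem_singleton.2 rfl)),
                  hroot_new⟩
              · intro hx
                obtain ⟨hx1, hx2⟩ := hx
                by_cases hxe : x = m
                · subst hxe; exact List.mem_singleton.2 rfl
                · exfalso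
                  rw [hroot_old x hxe] at hx2
                  rw [hpkeys] at hx1
                  rcases List.mem_append.1 hx1 with hx1 | hx1
                  · exact hroot_mem x hx1 hx2
                  · exact hxe (List.mem_singleton.1 hx1)
            · rw [if_neg hrm] at hml
              have hold := h.memchar r l hml x
              constructor
              · intro hx
                have hq := hold.1 hx
                have hxe : x ≠ m := fun hh => hm (hh ▸ hq.1)
                refine ⟨by rw [hpkeys]; exact List.mem_append.2 (Or.inl hq.1), ?_⟩
                rw [hroot_old x hxe]
                exact hq.2
              · intro hx
                obtain ⟨hx1, hx2⟩ := hx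
                by_cases hxe : x = m
                · subst hxe
                  rw [hroot_new] at hx2
                  exact absurd hx2.symm hrm
                · rw [hroot_old x hxe] at hx2
                  rw [hpkeys] at hx1
                  rcases List.mem_append.1 hx1 with hx1 | hx1
                  · exact hold.2 ⟨hx1, hx2⟩
                  · exact absurd (List.mem_singleton.1 hx1) hxe
          · -- memnodup
            intro r l hml
            rw [PySem.Dict.get?_insert] at hml
            by_cases hrm : r = m
            · rw [if_pos hrm] at hml
              injection hml with hml
              subst hml
              exact List.nodup_singleton m
            · rw [if_neg hrm] at hml
              exact h.memnodup r l hml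
          · -- cm_lt
            intro e i hce
            rw [PySem.Dict.get?_insert] at hce
            rw [List.length_set, List.length_append]
            by_cases hee : e = m
            · rw [if_pos hee] at hce
              injection hce with hce
              subst hce
              simp
            · rw [if_neg hee] at hce
              have := h.cm_lt e i hce
              simp only [List.length_singleton]
              omega
          · -- cm_store
            intro e i hce
            rw [PySem.Dict.get?_insert] at hce
            by_cases hee : e = m
            · rw [if_pos hee] at hce
              injection hce with hce
              subst hce
              subst hee
              rw [hroot_new, hsgd, PySem.Dict.getD_insert, if_pos rfl]
            · rw [if_neg hee] at hce
              have hek : e ∈ parent.keys := h.kdom ▸ mem_keys_of_get? _ _ _ hce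
              rw [hroot_old e hee, hsgdi i (h.cm_lt e i hce),
                PySem.Dict.getD_insert, if_neg (hroot_mem e hek)]
              exact h.cm_store e i hce
          · -- cm_inj
            intro e e' i i' hce hce'
            rw [PySem.Dict.get?_insert] at hce hce'
            by_cases hee : e = m <;> by_cases hee' : e' = m
            · rw [if_pos hee] at hce; rw [if_pos hee'] at hce'
              injection hce with hce; injection hce' with hce'
              subst hce; subst hce'; subst hee; subst hee'
              simp
            · rw [if_pos hee] at hce; rw [if_neg hee'] at hce'
              injection hce with hce
              subst hce; subst hee
              have hek' : e' ∈ parent.keys := h.kdom ▸ mem_keys_of_get? _ _ _ hce'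
              rw [hroot_new, hroot_old e' hee']
              constructor
              · intro hh
                exact absurd hh.symm (Nat.ne_of_lt (h.cm_lt e' i' hce'))
              · intro hh
                exact absurd hh.symm (hroot_mem e' hek')
            · rw [if_neg hee] at hce; rw [if_pos hee'] at hce'
              injection hce' with hce'
              subst hce'; subst hee'
              have hek : e ∈ parent.keys := h.kdom ▸ mem_keys_of_get? _ _ _ hce
              rw [hroot_new, hroot_old e hee]
              constructor
              · intro hh
                exact absurd hh (Nat.ne_of_lt (h.cm_lt e i hce))
              · intro hh
                exact absurd hh (hroot_mem e hek)
            · rw [if_neg hee] at hce; rw [if_neg hee'] at hce'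
              rw [hroot_old e hee, hroot_old e' hee']
              exact h.cm_inj e e' i i' hce hce'
          · -- rt_root
            rw [PySem.Dict.get?_insert_self]
          · -- store_lid
            rw [hsgd, PySem.Dict.getD_insert, if_pos rfl]
          · -- corr
            intro e i hce
            rw [PySem.Dict.get?_insert] at hce
            by_cases hee : e = m
            · rw [if_pos hee] at hce
              injection hce with hce
              subst hce; subst hee
              rw [hroot_new]
              simp
            · rw [if_neg hee] at hce
              have hek : e ∈ parent.keys := h.kdom ▸ mem_keys_of_get? _ _ _ hce
              rw [hroot_old e hee]
              constructor
              · intro hh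
                exact absurd hh (Nat.ne_of_lt (h.cm_lt e i hce))
              · intro hh
                exact absurd hh (hroot_mem e hek)
        obtain ⟨D', h'⟩ := inner_fold hinner rest
        exact ⟨D', h'.base⟩

theorem main_fold (linkages : List (List Int)) :
    ∀ cmap store parent members D, SimInv cmap store parent members D →
    ∃ D', SimInv (linkages.foldl stepLinkA (cmap, store)).1
      (linkages.foldl stepLinkA (cmap, store)).2
      (linkages.foldl stepLinkB (parent, members)).1
      (linkages.foldl stepLinkB (parent, members)).2 D' := by
  induction linkages with
  | nil => intro cmap store parent members D h; exact ⟨D, h⟩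
  | cons lk t ih =>
    intro cmap store parent members D h
    simp only [List.foldl_cons]
    obtain ⟨D1, h1⟩ := link_step h lk
    exact ih _ _ _ _ _ h1

-- ---------- the output phase ----------

theorem out_fold {cmap store parent members D}
    (h : SimInv cmap store parent members D) :
    ∀ (ks : List Int) (comps result : PySem.Dict Int (List Int)),
      (∀ e ∈ ks, e ∈ parent.keys) → ks.Nodup → (∀ e ∈ ks, e ∉ result.keys) →
      (∀ r v, comps.get? r = some v → v = members.getD r []) →
      (ks.foldl (fun (acc : PySem.Dict Int (List Int) × PySem.Dict Int (List Int)) e =>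
          let r := findB parent parent.size e
          let comps := if acc.1.contains r then acc.1
            else acc.1.insert r (PySem.Set.ofList (members.getD r []))
          (comps, acc.2.insert e (comps.getD r []))) (comps, result)).2.items =
        result.items ++ ks.map (fun e => (e, members.getD (rootAt parent D e) [])) := by
  intro ks
  induction ks with
  | nil => intro comps result _ _ _ _; simp
  | cons e ks ih =>
    intro comps result hks hnd hres hcomps
    simp only [List.foldl_cons]
    have hek : e ∈ parent.keys := hks e List.mem_cons_self
    have hfind : findB parent parent.size e = rootAt parent D e := h.find_size e
    obtain ⟨l, hl, hlgd, hlnd, _⟩ := h.root_members hek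
    rw [hfind]
    have hofl : PySem.Set.ofList (members.getD (rootAt parent D e) []) =
        members.getD (rootAt parent D e) [] := by
      rw [hlgd]
      exact PySem.Set.ofList_eq_self_of_nodup l hlnd
    -- the new comps still maps every known root to its member list
    have hcomps' : ∀ r v,
        (if comps.contains (rootAt parent D e) then comps
          else comps.insert (rootAt parent D e)
            (PySem.Set.ofList (members.getD (rootAt parent D e) []))).get? r = some v →
        v = members.getD r [] := by
      intro r v hv
      by_cases hc : comps.contains (rootAt parent D e)
      · rw [if_pos hc] at hv; exact hcomps r v hv
      · rw [if_neg hc, PySem.Dict.get?_insert] at hv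
        by_cases hr : r = rootAt parent D e
        · rw [if_pos hr] at hv
          injection hv with hv
          rw [← hv, hofl, hr]
        · rw [if_neg hr] at hv
          exact hcomps r v hv
    have hgd : (if comps.contains (rootAt parent D e) then comps
          else comps.insert (rootAt parent D e)
            (PySem.Set.ofList (members.getD (rootAt parent D e) []))).getD
          (rootAt parent D e) [] = members.getD (rootAt parent D e) [] := by
      by_cases hc : comps.contains (rootAt parent D e)
      · rw [if_pos hc]
        rw [PySem.Dict.contains_eq_isSome_get?] at hc
        cases hv : comps.get? (rootAt parent D e) with
        | none => rw [hv] at hc; simp at hc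
        | some v =>
          unfold PySem.Dict.getD
          rw [hv]
          exact hcomps _ v hv
      · rw [if_neg hc, PySem.Dict.getD_insert, if_pos rfl, hofl]
    have hresk : (result.insert e ((if comps.contains (rootAt parent D e) then comps
          else comps.insert (rootAt parent D e)
            (PySem.Set.ofList (members.getD (rootAt parent D e) []))).getD
          (rootAt parent D e) [])).keys = result.keys ++ [e] :=
      PySem.Dict.keys_insert_of_not_contains result _
        (contains_eq_false_of_not_mem _ _ (hres e List.mem_cons_self))
    have hresit : (result.insert e ((if comps.contains (rootAt parent D e) then comps
          else comps.insert (rootAt parent D e)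
            (PySem.Set.ofList (members.getD (rootAt parent D e) []))).getD
          (rootAt parent D e) [])).items = result.items ++
            [(e, members.getD (rootAt parent D e) [])] := by
      rw [PySem.Dict.items_insert_of_not_contains result _
        (contains_eq_false_of_not_mem _ _ (hres e List.mem_cons_self)), hgd]
    rw [ih _ _ (fun y hy => hks y (List.mem_cons_of_mem _ hy)) (List.Nodup.of_cons hnd)
      (by
        intro y hy
        rw [hresk]
        intro hc
        rcases List.mem_append.1 hc with hc | hc
        · exact hres y (List.mem_cons_of_mem _ hy) hc
        · rcases List.mem_singleton.1 hc with rfl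
          exact (List.nodup_cons.1 hnd).1 hy)
      hcomps']
    rw [hresit, List.map_cons, List.append_assoc]
    rfl

theorem final_eq {cmap store parent members D}
    (h : SimInv cmap store parent members D) :
    cmap.items.map (fun p => (p.1, store.getD p.2 [])) =
      (parent.keys.foldl (fun (acc : PySem.Dict Int (List Int) × PySem.Dict Int (List Int)) e =>
          let r := findB parent parent.size e
          let comps := if acc.1.contains r then acc.1
            else acc.1.insert r (PySem.Set.ofList (members.getD r []))
          (comps, acc.2.insert e (comps.getD r []))) (PySem.Dict.empty, PySem.Dict.empty)).2.items := by
  have hout := out_fold h parent.keys PySem.Dict.empty PySem.Dict.empty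
    (fun e he => he) h.pk_nodup
    (by intro e _; rw [PySem.Dict.keys_empty]; exact List.not_mem_nil)
    (by intro r v hml; rw [PySem.Dict.get?_empty] at hml; cases hml)
  rw [hout]
  have hkn : cmap.keys.Nodup := by rw [h.kdom]; exact h.pk_nodup
  have hmapc : ∀ p ∈ cmap.items,
      (p.1, store.getD p.2 []) = (p.1, members.getD (rootAt parent D p.1) []) := by
    intro p hp
    obtain ⟨k, v⟩ := p
    have hg : cmap.get? k = some v := PySem.Dict.get?_of_mem_items cmap hp hkn
    rw [h.cm_store k v hg]
  calc cmap.items.map (fun p => (p.1, store.getD p.2 []))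
      = cmap.items.map (fun p => (p.1, members.getD (rootAt parent D p.1) [])) :=
        List.map_congr_left hmapc
    _ = (cmap.items.map (fun p => p.1)).map
          (fun k => (k, members.getD (rootAt parent D k) [])) := by
        rw [List.map_map]; rfl
    _ = parent.keys.map (fun e => (e, members.getD (rootAt parent D e) [])) := by
        rw [show cmap.items.map (fun p => p.1) = cmap.keys from rfl, h.kdom]
    _ = PySem.Dict.empty.items ++
          parent.keys.map (fun e => (e, members.getD (rootAt parent D e) [])) := by
        rfl

theorem sim_init : SimInv PySem.Dict.empty [] PySem.Dict.empty PySem.Dict.empty (fun _ => 0) := by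
  refine ⟨?_, ?_, ?_, ?_, ?_, ?_, ?_, ?_, ?_, ?_, ?_⟩
  · rw [PySem.Dict.keys_empty]; exact List.nodup_nil
  · rfl
  · intro x p hget _; rw [PySem.Dict.get?_empty] at hget; cases hget
  · intro x hx; rw [PySem.Dict.keys_empty] at hx; exact absurd hx List.not_mem_nil
  · intro r
    rw [PySem.Dict.keys_empty, PySem.Dict.get?_empty]
    simp
  · rw [PySem.Dict.keys_empty]; exact List.nodup_nil
  · intro r l hml; rw [PySem.Dict.get?_empty] at hml; cases hml
  · intro r l hml; rw [PySem.Dict.get?_empty] at hml; cases hml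
  · intro e i hce; rw [PySem.Dict.get?_empty] at hce; cases hce
  · intro e i hce; rw [PySem.Dict.get?_empty] at hce; cases hce
  · intro e e' i i' hce _; rw [PySem.Dict.get?_empty] at hce; cases hce

-- ===== VERDICT (by name: the statement is the Claim_ definition above) =====
theorem cluster_by_linkages_spec : Claim_equal_cluster_by_linkages := by
  intro linkages _ _
  unfold Spec_cluster_by_linkages cluster_by_linkages cluster_by_linkages_alt
  obtain ⟨D', hsim⟩ := main_fold linkages _ _ _ _ _ sim_init
  exact final_eq hsim
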